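-- pv_equiv track=rewrite | github.com/dock108dev/sda | api/app/services/pipeline/helpers/evidence_selection.py | _previous_event_index
-- ===== SOURCE A (Python) =====
-- from typing import Any
--
-- def _previous_event_index(
--     pbp_events: list[dict[str, Any]],
--     target_play_index: int,
-- ) -> int | None:
--     """Return the list index of the event immediately preceding target_play_index.
--
--     Walks the input order (assumed sorted by play_index, matching NORMALIZE_PBP).
--     Returns None if no event precedes the target.
--     """
--     prev_idx: int | None = None
--     for i, ev in enumerate(pbp_events):
--         pi = ev.get("play_index")
--         if pi is None:
--             continue
--         if pi >= target_play_index: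
--             return prev_idx
--         prev_idx = i
--     return prev_idx
-- ===== SOURCE B (Python) =====
-- def _previous_event_index(pbp_events, target_play_index):
--     # Phase 1: find the cutoff = index of the first event whose play_index
--     # is present and >= target (default: len(pbp_events)).
--     cutoff = len(pbp_events)
--     for i, ev in enumerate(pbp_events):
--         pi = ev.get("play_index")
--         if pi is not None and pi >= target_play_index:
--             cutoff = i
--             break
--     # Phase 2: scan the prefix backward for the last event with a play_index.
--     for i, ev in reversed(list(enumerate(pbp_events[:cutoff]))):
--         if ev.get("play_index") is not None:
--             return i
--     return None
-- ===== Notes on version B (the rewrite author's own statement) =====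
-- stated objective: alternative
-- what changed: Replaces A's single accumulator-carrying scan by two phases: a forward scan locating the cutoff (first event with play_index >= target) and a backward scan of the prefix for the last event carrying a play_index.
import Mathlib
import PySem

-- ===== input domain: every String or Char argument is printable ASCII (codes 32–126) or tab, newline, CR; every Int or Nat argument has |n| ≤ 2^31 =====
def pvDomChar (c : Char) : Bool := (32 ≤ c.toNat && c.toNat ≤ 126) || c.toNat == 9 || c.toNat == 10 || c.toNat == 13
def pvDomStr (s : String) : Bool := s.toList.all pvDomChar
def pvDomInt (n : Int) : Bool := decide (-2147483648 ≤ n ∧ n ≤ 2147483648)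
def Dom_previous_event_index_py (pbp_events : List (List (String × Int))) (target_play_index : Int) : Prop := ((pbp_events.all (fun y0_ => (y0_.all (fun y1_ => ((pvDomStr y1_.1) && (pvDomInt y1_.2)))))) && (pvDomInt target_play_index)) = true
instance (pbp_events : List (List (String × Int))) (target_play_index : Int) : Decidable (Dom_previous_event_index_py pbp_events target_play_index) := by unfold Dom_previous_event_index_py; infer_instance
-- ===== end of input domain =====

-- B differs from A by decomposition only (cutoff scan + backward search); same return value.

-- ===== PORT A =====
-- ev.get("play_index") for the event dict
def pvGetPI (ev : List (String × Int)) : Option Int :=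
  (PySem.Dict.mk ev).get? "play_index"

-- the enumerate loop of A, carrying the running index i and prev_idx
def pvGoA (xs : List (List (String × Int))) (t : Int) (i : Nat) (prev : Option Int) : Option Int :=
  match xs with
  | [] => prev
  | ev :: rest =>
    match pvGetPI ev with
    | none => pvGoA rest t (i + 1) prev          -- continue
    | some pi => if pi ≥ t then prev else pvGoA rest t (i + 1) (some (i : Int))

def previous_event_index_py (pbp_events : List (List (String × Int))) (target_play_index : Int) : Option Int :=
  pvGoA pbp_events target_play_index 0 none

-- ===== PORT B =====
-- phase 1: first index whose play_index is present and ≥ target; default len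
def pvCutoff (xs : List (List (String × Int))) (t : Int) (i : Nat) : Nat :=
  match xs with
  | [] => i
  | ev :: rest =>
    match pvGetPI ev with
    | some pi => if pi ≥ t then i else pvCutoff rest t (i + 1)
    | none => pvCutoff rest t (i + 1)

-- phase 2: reversed(list(enumerate(prefix))) search — walk the reversed prefix with its top index
def pvBackFind (xs : List (List (String × Int))) (i : Nat) : Option Int :=
  match xs with
  | [] => none
  | ev :: rest => if (pvGetPI ev).isSome then some (i : Int) else pvBackFind rest (i - 1)

def previous_event_index_py_alt (pbp_events : List (List (String × Int))) (target_play_index : Int) : Option Int :=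
  let pre := pbp_events.take (pvCutoff pbp_events target_play_index 0)   -- pbp_events[:cutoff]
  pvBackFind pre.reverse (pre.length - 1)

-- ===== PRECONDITION & SPEC =====
def Spec_previous_event_index_py (pbp_events : List (List (String × Int))) (target_play_index : Int) (out : Option Int) : Prop := out = previous_event_index_py_alt pbp_events target_play_index
instance (pbp_events : List (List (String × Int))) (target_play_index : Int) (out : Option Int) : Decidable (Spec_previous_event_index_py pbp_events target_play_index out) := by unfold Spec_previous_event_index_py; infer_instance

-- ===== CLAIM (what is proved, stated in full; the proofs are below) =====
def Claim_equal_previous_event_index_py : Prop := ∀ (pbp_events : List (List (String × Int))) (target_play_index : Int), Dom_previous_event_index_py pbp_events target_play_index → Spec_previous_event_index_py pbp_events target_play_index (previous_event_index_py pbp_events target_play_index)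

-- ===== LEMMAS AND PROOFS =====

-- forward "last present index" scan used as a common characterisation
def pvLastSome (xs : List (List (String × Int))) (i : Nat) (prev : Option Int) : Option Int :=
  match xs with
  | [] => prev
  | ev :: rest => pvLastSome rest (i + 1) (if (pvGetPI ev).isSome then some (i : Int) else prev)

theorem pvCutoff_ge (xs : List (List (String × Int))) (t : Int) (i : Nat) :
    i ≤ pvCutoff xs t i := by
  induction xs generalizing i with
  | nil => simp [pvCutoff]
  | cons ev rest ih =>
    simp only [pvCutoff]
    cases pvGetPI ev with
    | none => exact le_trans (Nat.le_succ i) (ih (i + 1))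
    | some pi =>
      by_cases h : pi ≥ t
      · simp [h]
      · simpa [h] using le_trans (Nat.le_succ i) (ih (i + 1))

theorem pvGoA_eq_lastSome (xs : List (List (String × Int))) (t : Int) (i : Nat) (prev : Option Int) :
    pvGoA xs t i prev = pvLastSome (xs.take (pvCutoff xs t i - i)) i prev := by
  induction xs generalizing i prev with
  | nil => simp [pvGoA, pvCutoff, pvLastSome]
  | cons ev rest ih =>
    simp only [pvGoA, pvCutoff]
    cases hpi : pvGetPI ev with
    | none =>
      have hge := pvCutoff_ge rest t (i + 1)
      have : pvCutoff rest t (i + 1) - i = (pvCutoff rest t (i + 1) - (i + 1)) + 1 := by omega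
      rw [this, List.take_succ_cons]
      simp [pvLastSome, hpi, ih]
    | some pi =>
      by_cases h : pi ≥ t
      · simp [h, pvLastSome]
      · have hge := pvCutoff_ge rest t (i + 1)
        dsimp only
        rw [if_neg h]
        have h2 : (if pi ≥ t then i else pvCutoff rest t (i + 1)) - i
            = (pvCutoff rest t (i + 1) - (i + 1)) + 1 := by rw [if_neg h]; omega
        rw [h2, List.take_succ_cons]
        simp [pvLastSome, hpi, ih]

theorem pvLastSome_append (as bs : List (List (String × Int))) (i : Nat) (prev : Option Int) :
    pvLastSome (as ++ bs) i prev = pvLastSome bs (i + as.length) (pvLastSome as i prev) := by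
  induction as generalizing i prev with
  | nil => simp [pvLastSome]
  | cons ev rest ih =>
    simp only [List.cons_append, pvLastSome, ih, List.length_cons]
    ring_nf

theorem pvBackFind_eq_lastSome (xs : List (List (String × Int))) (i : Nat) :
    pvBackFind xs.reverse (i + xs.length - 1) = pvLastSome xs i none := by
  induction xs using List.reverseRecOn generalizing i with
  | nil => simp [pvBackFind, pvLastSome]
  | append_singleton zs ev ih =>
    rw [List.reverse_append, List.reverse_singleton, pvLastSome_append]
    simp only [List.singleton_append, pvBackFind, pvLastSome, List.length_append,
      List.length_singleton]
    have h4 : i + (zs.length + 1) - 1 = i + zs.length := by omega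
    by_cases h : (pvGetPI ev).isSome
    · simp only [h, if_true, h4]
    · simp only [h, if_false, Bool.false_eq_true]
      have h3 : i + (zs.length + 1) - 1 - 1 = i + zs.length - 1 := by omega
      rw [h3]
      exact ih i

-- ===== VERDICT (by name: the statement is the Claim_ definition above) =====
theorem previous_event_index_py_spec : Claim_equal_previous_event_index_py := by
  intro xs t _
  show previous_event_index_py xs t = previous_event_index_py_alt xs t
  unfold previous_event_index_py previous_event_index_py_alt
  rw [pvGoA_eq_lastSome]
  have hc : pvCutoff xs t 0 - 0 = pvCutoff xs t 0 := by omega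
  rw [hc]
  have := pvBackFind_eq_lastSome (xs.take (pvCutoff xs t 0)) 0
  simpa using this.symm
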